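-- pv_equiv track=rewrite | github.com/tkwang0530/LeetCode | 1943.py | splitPainting
-- ===== SOURCE A (Python) =====
-- import collections
-- from typing import List
--
-- def splitPainting(segments: List[List[int]]) -> List[List[int]]:
--     timeIncreaseColor = collections.defaultdict(int)
--     for start,end,color in segments:
--         timeIncreaseColor[start] += color
--         timeIncreaseColor[end] -= color
--
--     output = []
--     currentColor = 0
--     preTime = -1
--     for time in sorted(timeIncreaseColor.keys()):
--         if currentColor > 0:
--             output.append([preTime, time, currentColor])
--         preTime = time
--         currentColor += timeIncreaseColor[time]
--     return output
-- ===== SOURCE B (Python) =====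
-- def splitPainting(segments):
--     coords = sorted({pt for s, e, _ in segments for pt in (s, e)})
--     out = []
--     for lo, hi in zip(coords, coords[1:]):
--         total = sum((c if s <= lo else 0) - (c if e <= lo else 0) for s, e, c in segments)
--         if total > 0:
--             out.append([lo, hi, total])
--     return out
-- ===== Notes on version B (the rewrite author's own statement) =====
-- stated objective: alternative
-- what changed: Replaces the delta-dictionary plus running prefix-sum sweep by a stateless per-gap recomputation: sort the distinct boundary coordinates, then for each consecutive pair rescan all segments to compute the net active color (sum of colors started minus colors ended by the gap's left end).
import Mathlib
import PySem

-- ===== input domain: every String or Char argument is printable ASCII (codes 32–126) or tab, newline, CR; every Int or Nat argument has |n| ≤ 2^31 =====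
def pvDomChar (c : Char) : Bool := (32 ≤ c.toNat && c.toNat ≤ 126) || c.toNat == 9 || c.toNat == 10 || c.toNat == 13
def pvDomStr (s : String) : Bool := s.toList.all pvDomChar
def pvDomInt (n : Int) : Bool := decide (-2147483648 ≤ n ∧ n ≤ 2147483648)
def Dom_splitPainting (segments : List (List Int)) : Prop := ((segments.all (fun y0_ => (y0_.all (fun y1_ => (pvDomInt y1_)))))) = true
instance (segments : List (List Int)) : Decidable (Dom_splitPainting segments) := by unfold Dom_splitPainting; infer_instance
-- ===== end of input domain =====

-- B replaces A's delta-dict + running-sum sweep by a stateless per-gap rescan of the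
-- segments over the sorted distinct boundary coordinates (alternative algorithm, not faster).

-- ===== PORT A =====
def splitPainting (segments : List (List Int)) : List (List Int) :=
  -- timeIncreaseColor = defaultdict(int); for start,end,color in segments: +=color / -=color
  let d : PySem.Dict Int Int := segments.foldl (fun d seg =>
    match seg with
    | [start, stop, color] =>
      let d := d.insert start (d.getD start 0 + color)
      d.insert stop (d.getD stop 0 - color)
    | _ => d) PySem.Dict.empty
  -- output = []; currentColor = 0; preTime = -1; for time in sorted(keys): ...
  let st := (PySem.List.sorted d.keys (fun x => x) false).foldl
    (fun (st : List (List Int) × Int × Int) time =>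
      ((if st.2.1 > 0 then st.1 ++ [[st.2.2, time, st.2.1]] else st.1),
       st.2.1 + d.getD time 0, time)) ([], 0, -1)
  st.1

-- ===== PORT B =====
-- {pt for s,e,_ in segments for pt in (s,e)} flattened in order (the later sorted() makes set order moot)
def pvBounds : List (List Int) → List Int
  | [] => []
  | seg :: rest =>
    (match seg with
     | [] => []
     | _ :: [] => []
     | _ :: _ :: [] => []
     | s :: e :: _ :: [] => [s, e]
     | _ :: _ :: _ :: _ :: _ => []) ++ pvBounds rest

-- sum((c if s <= lo else 0) - (c if e <= lo else 0) for s, e, c in segments)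
def pvTotal (segments : List (List Int)) (lo : Int) : Int :=
  match segments with
  | [] => 0
  | seg :: rest =>
    (match seg with
     | [] => 0
     | _ :: [] => 0
     | _ :: _ :: [] => 0
     | s :: e :: c :: [] => (if s ≤ lo then c else 0) - (if e ≤ lo then c else 0)
     | _ :: _ :: _ :: _ :: _ => 0) + pvTotal rest lo

def splitPainting_alt (segments : List (List Int)) : List (List Int) :=
  let coords := PySem.List.sorted (PySem.Set.ofList (pvBounds segments)) (fun x => x) false
  (coords.zip coords.tail).foldl (fun out (p : Int × Int) =>
    if pvTotal segments p.1 > 0 then out ++ [[p.1, p.2, pvTotal segments p.1]] else out) []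

-- ===== PRECONDITION & SPEC =====
-- Pre_ excludes exactly the inputs where A's tuple unpacking raises ValueError (a segment that is not a
-- triple); B raises there too. The Lean ports happen to agree even outside Pre_, so the proof needs no more.
def Pre_splitPainting (segments : List (List Int)) : Prop :=
  ∀ seg ∈ segments, seg.length = 3
instance (segments : List (List Int)) : Decidable (Pre_splitPainting segments) := by
  unfold Pre_splitPainting; infer_instance

def pvWitness_splitPainting : List (List Int) := [[1, 4, 5], [4, 7, 7], [1, 7, 9]]

def Spec_splitPainting (segments : List (List Int)) (out : List (List Int)) : Prop := out = splitPainting_alt segments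
instance (segments : List (List Int)) (out : List (List Int)) : Decidable (Spec_splitPainting segments out) := by unfold Spec_splitPainting; infer_instance

-- ===== CLAIM (what is proved, stated in full; the proofs are below) =====
def Claim_equal_splitPainting : Prop := ∀ (segments : List (List Int)), Dom_splitPainting segments → Pre_splitPainting segments → Spec_splitPainting segments (splitPainting segments)

-- ===== LEMMAS AND PROOFS =====

-- per-coordinate delta: what A's dictionary stores at t
def pvDelta (segments : List (List Int)) (t : Int) : Int :=
  match segments with
  | [] => 0
  | seg :: rest =>
    (match seg with
     | [s, e, c] => (if s = t then c else 0) - (if e = t then c else 0)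
     | _ => 0) + pvDelta rest t

lemma getD_dictFold (segs : List (List Int)) :
    ∀ (d : PySem.Dict Int Int) (t : Int),
    (segs.foldl (fun d seg =>
      match seg with
      | [start, stop, color] =>
        let d := d.insert start (d.getD start 0 + color)
        d.insert stop (d.getD stop 0 - color)
      | _ => d) d).getD t 0 = d.getD t 0 + pvDelta segs t := by
  induction segs with
  | nil => intro d t; simp [pvDelta]
  | cons seg rest ih =>
    intro d t
    rcases seg with _ | ⟨s, _ | ⟨e, _ | ⟨c, _ | ⟨x, xs⟩⟩⟩⟩ <;>
      simp only [List.foldl_cons, pvDelta, ih] <;>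
      simp [PySem.Dict.getD_insert] <;> split_ifs <;> subst_vars <;> omega

lemma nodup_keys_dictFold (segs : List (List Int)) :
    ∀ (d : PySem.Dict Int Int), d.keys.Nodup →
    (segs.foldl (fun d seg =>
      match seg with
      | [start, stop, color] =>
        let d := d.insert start (d.getD start 0 + color)
        d.insert stop (d.getD stop 0 - color)
      | _ => d) d).keys.Nodup := by
  induction segs with
  | nil => intro d h; simpa using h
  | cons seg rest ih =>
    intro d h
    rcases seg with _ | ⟨s, _ | ⟨e, _ | ⟨c, _ | ⟨x, xs⟩⟩⟩⟩ <;>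
      simp only [List.foldl_cons] <;>
      exact ih _ (by first | exact h | exact PySem.Dict.nodup_keys_insert _ _ _ (PySem.Dict.nodup_keys_insert _ _ _ h))

lemma mem_keys_dictFold (segs : List (List Int)) :
    ∀ (d : PySem.Dict Int Int) (t : Int),
    (t ∈ (segs.foldl (fun d seg =>
      match seg with
      | [start, stop, color] =>
        let d := d.insert start (d.getD start 0 + color)
        d.insert stop (d.getD stop 0 - color)
      | _ => d) d).keys ↔ t ∈ d.keys ∨ t ∈ pvBounds segs) := by
  induction segs with
  | nil => intro d t; simp [pvBounds]
  | cons seg rest ih =>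
    intro d t
    rcases seg with _ | ⟨s, _ | ⟨e, _ | ⟨c, _ | ⟨x, xs⟩⟩⟩⟩ <;>
      simp only [List.foldl_cons, ih, pvBounds, PySem.Dict.mem_keys_insert, List.mem_append,
        List.mem_cons, List.not_mem_nil] <;> tauto

lemma sorted_keys_eq (segs : List (List Int)) :
    PySem.List.sorted ((segs.foldl (fun d seg =>
      match seg with
      | [start, stop, color] =>
        let d := d.insert start (d.getD start 0 + color)
        d.insert stop (d.getD stop 0 - color)
      | _ => d) (PySem.Dict.empty : PySem.Dict Int Int)).keys) (fun x => x) false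
    = PySem.List.sorted (PySem.Set.ofList (pvBounds segs)) (fun x => x) false := by
  apply PySem.List.sorted_eq_sorted_of_perm _ _ _ (fun a b h => h)
  apply (List.perm_ext_iff_of_nodup ?_ ?_).mpr
  · intro a
    rw [mem_keys_dictFold, PySem.Set.mem_ofList]
    simp [PySem.Dict.keys_empty]
  · exact nodup_keys_dictFold _ _ (by simp [PySem.Dict.keys_empty])
  · exact PySem.Set.nodup_ofList _

lemma total_step (segs : List (List Int)) (pre k : Int) (hpk : pre < k)
    (h : ∀ t ∈ pvBounds segs, t ≤ pre ∨ k ≤ t) :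
    pvTotal segs k = pvTotal segs pre + pvDelta segs k := by
  induction segs with
  | nil => simp [pvTotal, pvDelta]
  | cons seg rest ih =>
    have hrest : ∀ t ∈ pvBounds rest, t ≤ pre ∨ k ≤ t := by
      intro t ht; exact h t (by simp [pvBounds, ht])
    rcases seg with _ | ⟨s, _ | ⟨e, _ | ⟨c, _ | ⟨x, xs⟩⟩⟩⟩ <;>
      simp only [pvTotal, pvDelta, ih hrest] <;> try omega
    have hs := h s (by simp [pvBounds])
    have he := h e (by simp [pvBounds])
    split_ifs <;> omega

lemma total_head (segs : List (List Int)) (k : Int)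
    (h : ∀ t ∈ pvBounds segs, k ≤ t) :
    pvTotal segs k = pvDelta segs k := by
  induction segs with
  | nil => simp [pvTotal, pvDelta]
  | cons seg rest ih =>
    have hrest : ∀ t ∈ pvBounds rest, k ≤ t := by
      intro t ht; exact h t (by simp [pvBounds, ht])
    rcases seg with _ | ⟨s, _ | ⟨e, _ | ⟨c, _ | ⟨x, xs⟩⟩⟩⟩ <;>
      simp only [pvTotal, pvDelta, ih hrest] <;> try omega
    have hs := h s (by simp [pvBounds])
    have he := h e (by simp [pvBounds])
    split_ifs <;> omega

lemma loop_eq (segs : List (List Int)) :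
    ∀ (ks : List Int) (pre : Int) (out : List (List Int)),
    (pre :: ks).Pairwise (· < ·) →
    (∀ t ∈ pvBounds segs, t ≤ pre ∨ t ∈ ks) →
    (ks.foldl (fun (st : List (List Int) × Int × Int) time =>
        ((if st.2.1 > 0 then st.1 ++ [[st.2.2, time, st.2.1]] else st.1),
         st.2.1 + pvDelta segs time, time)) (out, pvTotal segs pre, pre)).1
    = ((pre :: ks).zip ks).foldl (fun out (p : Int × Int) =>
        if pvTotal segs p.1 > 0 then out ++ [[p.1, p.2, pvTotal segs p.1]] else out) out := by
  intro ks
  induction ks with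
  | nil => intro pre out _ _; simp
  | cons k rest ih =>
    intro pre out hpw h
    have hpk : pre < k := (List.pairwise_cons.mp hpw).1 k (by simp)
    have hpw' : (k :: rest).Pairwise (· < ·) := (List.pairwise_cons.mp hpw).2
    have hstep : ∀ t ∈ pvBounds segs, t ≤ pre ∨ k ≤ t := by
      intro t ht
      rcases h t ht with h1 | h2
      · exact Or.inl h1
      · rcases List.mem_cons.mp h2 with rfl | hr
        · exact Or.inr le_rfl
        · exact Or.inr (le_of_lt ((List.pairwise_cons.mp hpw').1 t hr))
    have h' : ∀ t ∈ pvBounds segs, t ≤ k ∨ t ∈ rest := by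
      intro t ht
      rcases h t ht with h1 | h2
      · exact Or.inl (le_of_lt (lt_of_le_of_lt h1 hpk))
      · rcases List.mem_cons.mp h2 with rfl | hr
        · exact Or.inl le_rfl
        · exact Or.inr hr
    simp only [List.foldl_cons, List.zip_cons_cons]
    rw [show pvTotal segs pre + pvDelta segs k = pvTotal segs k from by
      rw [total_step segs pre k hpk hstep]]
    exact ih k _ hpw' h'

-- ===== VERDICT (by name: the statement is the Claim_ definition above) =====
theorem splitPainting_spec : Claim_equal_splitPainting := by
  unfold Claim_equal_splitPainting
  intro segs _ _
  unfold Spec_splitPainting splitPainting splitPainting_alt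
  simp only []
  rw [show (fun (st : List (List Int) × Int × Int) time =>
        ((if st.2.1 > 0 then st.1 ++ [[st.2.2, time, st.2.1]] else st.1),
         st.2.1 + (segs.foldl (fun d seg =>
            match seg with
            | [start, stop, color] =>
              let d := d.insert start (d.getD start 0 + color)
              d.insert stop (d.getD stop 0 - color)
            | _ => d) (PySem.Dict.empty : PySem.Dict Int Int)).getD time 0, time))
      = (fun (st : List (List Int) × Int × Int) time =>
        ((if st.2.1 > 0 then st.1 ++ [[st.2.2, time, st.2.1]] else st.1),
         st.2.1 + pvDelta segs time, time)) from
    funext fun st => funext fun time => by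
      rw [getD_dictFold]; simp [PySem.Dict.getD_empty]]
  rw [sorted_keys_eq]
  rcases hco : PySem.List.sorted (PySem.Set.ofList (pvBounds segs)) (fun x => x) false
    with _ | ⟨c0, rest⟩
  · simp
  · have hpw : (c0 :: rest).Pairwise (· < ·) := by
      rw [← hco]; exact PySem.List.sorted_ofList_pairwise_lt _
    have hmem : ∀ t ∈ pvBounds segs, t = c0 ∨ t ∈ rest := by
      intro t ht
      have : t ∈ c0 :: rest := by
        rw [← hco, PySem.List.mem_sorted, PySem.Set.mem_ofList]; exact ht
      exact List.mem_cons.mp this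
    have hhead : pvTotal segs c0 = pvDelta segs c0 := by
      apply total_head
      intro t ht
      rcases hmem t ht with rfl | hr
      · exact le_rfl
      · exact le_of_lt ((List.pairwise_cons.mp hpw).1 t hr)
    simp only [List.foldl_cons]
    rw [show ((if (0:Int) > 0 then ([] : List (List Int)) ++ [[(-1:Int), c0, 0]] else []),
          (0:Int) + pvDelta segs c0, c0) = (([] : List (List Int)), pvTotal segs c0, c0) from by
      simp [hhead]]
    rw [loop_eq segs rest c0 [] hpw (fun t ht => (hmem t ht).imp le_of_eq id)]
    simp
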